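-- pv_equiv track=rewrite | github.com/lassik/misc | text/character-sets-1.py | group_ints
-- ===== SOURCE A (Python) =====
-- def group_ints(maxgroupsize, ints):
--     groups = []
--     group = []
--     for int_ in sorted(set(ints)):
--         if group and int_ - group[0] >= maxgroupsize:
--             groups.append(group)
--             group = []
--         group.append(int_)
--     if group:
--         groups.append(group)
--     return groups
-- ===== SOURCE B (Python) =====
-- def group_ints(maxgroupsize, ints):
--     xs = sorted(set(ints))
--     groups = []
--     i = 0
--     n = len(xs)
--     while i < n:
--         start = xs[i]
--         j = i + 1
--         while j < n and xs[j] - start < maxgroupsize: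
--             j += 1
--         groups.append(xs[i:j])
--         i = j
--     return groups
-- ===== Notes on version B (the rewrite author's own statement) =====
-- stated objective: alternative
-- what changed: Replaces A's single flat pass with running group state and a trailing flush by an outer group-by-group loop that looks ahead with an inner index and slices each bounded-span group out directly, needing no flush.
import Mathlib
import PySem

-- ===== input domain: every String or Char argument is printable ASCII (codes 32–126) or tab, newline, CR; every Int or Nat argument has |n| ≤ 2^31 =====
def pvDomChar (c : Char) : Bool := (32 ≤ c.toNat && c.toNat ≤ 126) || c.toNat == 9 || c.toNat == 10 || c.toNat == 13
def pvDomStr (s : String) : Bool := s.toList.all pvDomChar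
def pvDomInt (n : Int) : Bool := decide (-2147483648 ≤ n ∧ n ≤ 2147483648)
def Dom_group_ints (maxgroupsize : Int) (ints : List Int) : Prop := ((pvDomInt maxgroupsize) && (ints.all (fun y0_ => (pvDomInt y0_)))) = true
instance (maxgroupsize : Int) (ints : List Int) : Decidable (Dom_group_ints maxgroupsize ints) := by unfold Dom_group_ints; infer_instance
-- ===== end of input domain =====

-- B is an alternative decomposition (same cost): outer group-by-group loop slicing each
-- bounded-span group via look-ahead, instead of A's flat pass with a trailing flush.

-- ===== PORT A =====
-- one fold step of A's for-loop over (groups, group)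
def pvStepA (m : Int) (st : List (List Int) × List Int) (i : Int) : List (List Int) × List Int :=
  let st' := if st.2 ≠ [] ∧ i - st.2.headD 0 ≥ m then (st.1 ++ [st.2], ([] : List Int)) else st
  (st'.1, st'.2 ++ [i])

def group_ints (maxgroupsize : Int) (ints : List Int) : List (List Int) :=
  let st := (PySem.List.sorted (PySem.Set.ofList ints) (fun x => x) false).foldl (pvStepA maxgroupsize) ([], [])
  if st.2 ≠ [] then st.1 ++ [st.2] else st.1

-- ===== PORT B =====
-- outer while-loop of B: take the current group by looking ahead (inner while = takeWhile),
-- continue after it (dropWhile); xs[i:j] is the slice start :: takeWhile …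
def pvGroupsB (m : Int) : List Int → List (List Int)
  | [] => []
  | x :: ys =>
      (x :: ys.takeWhile (fun y => decide (y - x < m))) ::
        pvGroupsB m (ys.dropWhile (fun y => decide (y - x < m)))
  termination_by xs => xs.length
  decreasing_by
    simp only [List.length_cons]
    exact Nat.lt_succ_of_le (List.length_dropWhile_le _ _)

def group_ints_alt (maxgroupsize : Int) (ints : List Int) : List (List Int) :=
  pvGroupsB maxgroupsize (PySem.List.sorted (PySem.Set.ofList ints) (fun x => x) false)

-- ===== PRECONDITION & SPEC =====
def Spec_group_ints (maxgroupsize : Int) (ints : List Int) (out : List (List Int)) : Prop := out = group_ints_alt maxgroupsize ints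
instance (maxgroupsize : Int) (ints : List Int) (out : List (List Int)) : Decidable (Spec_group_ints maxgroupsize ints out) := by unfold Spec_group_ints; infer_instance

-- ===== CLAIM (what is proved, stated in full; the proofs are below) =====
def Claim_equal_group_ints : Prop := ∀ (maxgroupsize : Int) (ints : List Int), Dom_group_ints maxgroupsize ints → Spec_group_ints maxgroupsize ints (group_ints maxgroupsize ints)

-- ===== LEMMAS AND PROOFS =====

-- flush of A's final state
def pvFlush (st : List (List Int) × List Int) : List (List Int) :=
  if st.2 ≠ [] then st.1 ++ [st.2] else st.1

-- loop invariant: with a nonempty current group (head s), A's remaining fold + flush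
-- produces the current group extended through takeWhile, then B's groups of the rest
theorem pvLoopA_eq (m : Int) (xs : List Int) : ∀ (groups : List (List Int)) (s : Int) (g : List Int),
    pvFlush (xs.foldl (pvStepA m) (groups, s :: g)) =
      groups ++ ((s :: g) ++ xs.takeWhile (fun y => decide (y - s < m))) ::
        pvGroupsB m (xs.dropWhile (fun y => decide (y - s < m))) := by
  induction xs with
  | nil =>
    intro groups s g
    simp [pvFlush, pvGroupsB]
  | cons y ys ih =>
    intro groups s g
    by_cases h : y - s < m
    · have hstep : pvStepA m (groups, s :: g) y = (groups, s :: (g ++ [y])) := by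
        simp [pvStepA, not_le.mpr h]
      simp only [List.foldl_cons, hstep, ih]
      simp [h]
    · have hge : y - s ≥ m := not_lt.mp h
      have hstep : pvStepA m (groups, s :: g) y = (groups ++ [s :: g], [y]) := by
        simp [pvStepA, hge]
      simp only [List.foldl_cons, hstep]
      have := ih (groups ++ [s :: g]) y []
      simp only [this]
      simp [h, pvGroupsB]

-- the two ports agree on an arbitrary element list (sortedness is not needed)
theorem pvFold_eq_groups (m : Int) (xs : List Int) :
    pvFlush (xs.foldl (pvStepA m) ([], [])) = pvGroupsB m xs := by
  cases xs with
  | nil => simp [pvFlush, pvGroupsB]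
  | cons x ys =>
    have hstep : pvStepA m (([], []) : List (List Int) × List Int) x = ([], [x]) := by
      simp [pvStepA]
    simp only [List.foldl_cons, hstep, pvLoopA_eq m ys [] x [], pvGroupsB]
    simp

-- ===== VERDICT (by name: the statement is the Claim_ definition above) =====
theorem group_ints_spec : Claim_equal_group_ints := by
  intro m ints _
  unfold Spec_group_ints group_ints group_ints_alt
  exact pvFold_eq_groups m _
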